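-- pv_equiv track=rewrite | github.com/Coff0xc/CTF-MCP | ctf_mcp/utils/helpers.py | rot_n
-- ===== SOURCE A (Python) =====
-- def rot_n(text: str, n: int = 13) -> str:
--     """ROT-N cipher"""
--     result = []
--     for char in text:
--         if char.isalpha():
--             base = ord('A') if char.isupper() else ord('a')
--             result.append(chr((ord(char) - base + n) % 26 + base))
--         else:
--             result.append(char)
--     return ''.join(result)
-- ===== SOURCE B (Python) =====
-- def rot_n(text: str, n: int = 13) -> str:
--     """ROT-N via a precomputed translation table (single translate pass)."""
--     upper = "ABCDEFGHIJKLMNOPQRSTUVWXYZ"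
--     lower = "abcdefghijklmnopqrstuvwxyz"
--     k = n % 26
--     table = str.maketrans(upper + lower,
--                           upper[k:] + upper[:k] + lower[k:] + lower[:k])
--     return text.translate(table)
-- ===== Notes on version B (the rewrite author's own statement) =====
-- stated objective: idiomatic
-- what changed: Replaces the per-character branch-and-arithmetic loop with a rotation table precomputed once via str.maketrans and a single text.translate pass; non-alphabetic characters fall through the table untouched.
import Mathlib
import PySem

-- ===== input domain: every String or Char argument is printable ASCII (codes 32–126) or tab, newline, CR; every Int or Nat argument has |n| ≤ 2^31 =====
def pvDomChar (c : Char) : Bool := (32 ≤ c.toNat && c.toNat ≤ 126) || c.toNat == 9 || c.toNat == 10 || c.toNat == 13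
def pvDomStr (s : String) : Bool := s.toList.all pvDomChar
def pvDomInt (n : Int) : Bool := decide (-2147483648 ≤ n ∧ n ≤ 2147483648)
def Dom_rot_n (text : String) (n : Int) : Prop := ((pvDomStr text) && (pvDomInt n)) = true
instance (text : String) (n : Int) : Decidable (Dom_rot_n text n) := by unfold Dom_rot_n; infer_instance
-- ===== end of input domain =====

-- B replaces A's per-character branch-and-arithmetic loop with a rotation table built once (str.maketrans) and one translate pass; same cost, more idiomatic.

-- ===== PORT A =====
def rot_n (text : String) (n : Int) : String :=
  let result := text.toList.foldl (fun (result : List Char) (char : Char) =>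
    if PySem.Chars.isalpha char then
      let base : Int := if PySem.Chars.isupper char then 65 else 97
      result ++ [Char.ofNat ((PySem.Int.mod ((char.toNat : Int) - base + n) 26 + base).toNat)]
    else
      result ++ [char]) []
  String.mk result

-- ===== PORT B =====
-- str.maketrans ported as the association list of (letter, rotated letter) pairs;
-- str.translate as first-match lookup with identity default over that table.
def rot_n_alt (text : String) (n : Int) : String :=
  let upper := "ABCDEFGHIJKLMNOPQRSTUVWXYZ".toList
  let lower := "abcdefghijklmnopqrstuvwxyz".toList
  let k := (PySem.Int.mod n 26).toNat
  let table : List (Char × Char) :=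
    (upper ++ lower).zip ((upper.drop k ++ upper.take k) ++ (lower.drop k ++ lower.take k))
  String.mk (text.toList.map (fun c => ((table.find? (fun p => p.1 == c)).map Prod.snd).getD c))

-- ===== PRECONDITION & SPEC =====
def Spec_rot_n (text : String) (n : Int) (out : String) : Prop := out = rot_n_alt text n
instance (text : String) (n : Int) (out : String) : Decidable (Spec_rot_n text n out) := by unfold Spec_rot_n; infer_instance

-- ===== CLAIM (what is proved, stated in full; the proofs are below) =====
def Claim_equal_rot_n : Prop := ∀ (text : String) (n : Int), Dom_rot_n text n → Spec_rot_n text n (rot_n text n)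

-- ===== LEMMAS AND PROOFS =====

-- A's per-character transform (the let of the port inlined; definitionally the same branch)
def aChar (n : Int) (char : Char) : Char :=
  if PySem.Chars.isalpha char then
    Char.ofNat ((PySem.Int.mod ((char.toNat : Int)
        - (if PySem.Chars.isupper char then (65 : Int) else 97) + n) 26
        + (if PySem.Chars.isupper char then (65 : Int) else 97)).toNat)
  else char

def pvKeys : List Char :=
  "ABCDEFGHIJKLMNOPQRSTUVWXYZ".toList ++ "abcdefghijklmnopqrstuvwxyz".toList

def pvVals (k : Nat) : List Char :=
  ("ABCDEFGHIJKLMNOPQRSTUVWXYZ".toList.drop k ++ "ABCDEFGHIJKLMNOPQRSTUVWXYZ".toList.take k)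
    ++ ("abcdefghijklmnopqrstuvwxyz".toList.drop k ++ "abcdefghijklmnopqrstuvwxyz".toList.take k)

-- B's per-character transform, with the table shift k already reduced mod 26
def bChar (k : Nat) (c : Char) : Char :=
  (((pvKeys.zip (pvVals k)).find? (fun p => p.1 == c)).map Prod.snd).getD c

lemma charValid (n : Nat) (h : n < 55296) : (Char.ofNat n).toNat = n := by
  rw [Char.toNat_ofNat, if_pos]
  exact Or.inl h

lemma isalpha_iff (c : Char) :
    PySem.Chars.isalpha c = true ↔
      ((65 ≤ c.toNat ∧ c.toNat ≤ 90) ∨ (97 ≤ c.toNat ∧ c.toNat ≤ 122)) := by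
  simp only [PySem.Chars.isalpha, PySem.Chars.isupper, PySem.Chars.islower,
    Bool.or_eq_true, Bool.and_eq_true, decide_eq_true_eq, Char.le_def,
    UInt32.le_iff_toNat_le]
  have e1 : 'A'.val.toNat = 65 := rfl
  have e2 : 'Z'.val.toNat = 90 := rfl
  have e3 : 'a'.val.toNat = 97 := rfl
  have e4 : 'z'.val.toNat = 122 := rfl
  have e5 : c.toNat = c.val.toNat := rfl
  rw [e1, e2, e3, e4, e5]

lemma isupper_iff (c : Char) :
    PySem.Chars.isupper c = true ↔ (65 ≤ c.toNat ∧ c.toNat ≤ 90) := by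
  simp only [PySem.Chars.isupper, Bool.and_eq_true, decide_eq_true_eq, Char.le_def,
    UInt32.le_iff_toNat_le]
  have e1 : 'A'.val.toNat = 65 := rfl
  have e2 : 'Z'.val.toNat = 90 := rfl
  have e5 : c.toNat = c.val.toNat := rfl
  rw [e1, e2, e5]

lemma gU : ∀ i, i < 26 →
    ("ABCDEFGHIJKLMNOPQRSTUVWXYZ".toList)[i]? = some (Char.ofNat (65 + i)) := by
  intro i h
  interval_cases i <;> decide

lemma gL : ∀ i, i < 26 →
    ("abcdefghijklmnopqrstuvwxyz".toList)[i]? = some (Char.ofNat (97 + i)) := by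
  intro i h
  interval_cases i <;> decide

lemma lenU : ("ABCDEFGHIJKLMNOPQRSTUVWXYZ".toList).length = 26 := by decide
lemma lenL : ("abcdefghijklmnopqrstuvwxyz".toList).length = 26 := by decide

lemma keys_at (j : Nat) (hj : j < 52) :
    pvKeys[j]? = some (Char.ofNat (if j < 26 then 65 + j else 97 + (j - 26))) := by
  unfold pvKeys
  by_cases h : j < 26
  · rw [List.getElem?_append_left (by rw [lenU]; omega), gU j h, if_pos h]
  · rw [List.getElem?_append_right (by rw [lenU]; omega), lenU,
      gL (j - 26) (by omega), if_neg h]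

lemma block_at (X : List Char) (b k j : Nat) (hlen : X.length = 26) (hk : k < 26)
    (hj : j < 26) (hX : ∀ i, i < 26 → X[i]? = some (Char.ofNat (b + i))) :
    (X.drop k ++ X.take k)[j]? = some (Char.ofNat (b + (j + k) % 26)) := by
  by_cases h2 : j < 26 - k
  · rw [List.getElem?_append_left (by simp only [List.length_drop, hlen]; omega),
      List.getElem?_drop, hX (k + j) (by omega)]
    congr 2
    omega
  · rw [List.getElem?_append_right (by simp only [List.length_drop, hlen]; omega)]
    have hidx : j - (X.drop k).length = j - (26 - k) := by
      simp only [List.length_drop, hlen]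
    rw [hidx, List.getElem?_take, if_pos (by omega), hX (j - (26 - k)) (by omega)]
    congr 2
    omega

lemma vals_at (k j : Nat) (hk : k < 26) (hj : j < 52) :
    (pvVals k)[j]? = some (Char.ofNat
      (if j < 26 then 65 + (j + k) % 26 else 97 + (j - 26 + k) % 26)) := by
  unfold pvVals
  by_cases h : j < 26
  · rw [List.getElem?_append_left
      (by simp only [List.length_append, List.length_drop, List.length_take, lenU]; omega),
      block_at _ 65 k j lenU hk h gU, if_pos h]
  · rw [List.getElem?_append_right
      (by simp only [List.length_append, List.length_drop, List.length_take, lenU]; omega)]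
    have hidx : j - ("ABCDEFGHIJKLMNOPQRSTUVWXYZ".toList.drop k
        ++ "ABCDEFGHIJKLMNOPQRSTUVWXYZ".toList.take k).length = j - 26 := by
      simp only [List.length_append, List.length_drop, List.length_take, lenU]
      omega
    rw [hidx, block_at _ 97 k (j - 26) lenL hk (by omega) gL, if_neg h]

lemma find_zip : ∀ (K : List Char) (V : List Char) (c : Char) (i : Nat) (v : Char),
    K[i]? = some c → V[i]? = some v →
    (∀ j, j < i → ∀ x, K[j]? = some x → x ≠ c) →
    (K.zip V).find? (fun p => p.1 == c) = some (c, v) := by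
  intro K
  induction K with
  | nil => intro V c i v hK _ _; simp at hK
  | cons a K' ih =>
    intro V c i v hK hV hpre
    cases V with
    | nil => simp at hV
    | cons b V' =>
      cases i with
      | zero =>
        simp only [List.getElem?_cons_zero, Option.some.injEq] at hK hV
        subst hK; subst hV
        rw [List.zip_cons_cons, List.find?_cons_of_pos (by simp)]
      | succ i' =>
        have hne : a ≠ c := hpre 0 (Nat.succ_pos _) a (by simp)
        rw [List.zip_cons_cons, List.find?_cons_of_neg (by simp [hne])]
        exact ih V' c i' v (by simpa using hK) (by simpa using hV)
          (fun j hj x hx => hpre (j + 1) (by omega) x (by simpa using hx))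

lemma lenKeys : pvKeys.length = 52 := by decide

lemma alpha_of_mem (c : Char) (hmem : c ∈ pvKeys) : PySem.Chars.isalpha c = true := by
  rcases List.mem_iff_getElem?.mp hmem with ⟨j, hj⟩
  have hj52 : j < 52 := by
    rcases List.getElem?_eq_some_iff.mp hj with ⟨hlt, _⟩
    have hl := lenKeys
    omega
  rw [keys_at j hj52] at hj
  have hc := Option.some_inj.mp hj
  by_cases h26 : j < 26
  · rw [if_pos h26] at hc
    have ht : c.toNat = 65 + j := by rw [← hc, charValid _ (by omega)]
    exact (isalpha_iff c).mpr (Or.inl ⟨by omega, by omega⟩)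
  · rw [if_neg h26] at hc
    have ht : c.toNat = 97 + (j - 26) := by rw [← hc, charValid _ (by omega)]
    exact (isalpha_iff c).mpr (Or.inr ⟨by omega, by omega⟩)

lemma bChar_not_mem {c : Char} (k : Nat) (h : c ∉ pvKeys) : bChar k c = c := by
  unfold bChar
  have hnone : (pvKeys.zip (pvVals k)).find? (fun p => p.1 == c) = none := by
    rw [List.find?_eq_none]
    intro p hp
    have hk := (List.of_mem_zip hp).1
    simp only [beq_iff_eq]
    intro hc; exact h (hc ▸ hk)
  rw [hnone]; rfl

lemma aChar_bChar (k : Nat) (hk : k < 26) (c : Char) : aChar (k : Int) c = bChar k c := by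
  have hmodAll : ∀ a : Int, PySem.Int.mod a 26 = a % 26 := fun a =>
    PySem.Int.mod_eq_emod_of_pos (by norm_num)
  by_cases ha : PySem.Chars.isalpha c = true
  · rcases (isalpha_iff c).mp ha with ⟨h1, h2⟩ | ⟨h1, h2⟩
    · -- uppercase letter, key index c.toNat - 65
      have hu : PySem.Chars.isupper c = true := (isupper_iff c).mpr ⟨h1, h2⟩
      have hc : Char.ofNat (65 + (c.toNat - 65)) = c := by
        conv_rhs => rw [← Char.ofNat_toNat c]
        congr 1
        omega
      have hkeys : pvKeys[c.toNat - 65]? = some c := by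
        rw [keys_at (c.toNat - 65) (by omega), if_pos (by omega), hc]
      have hvals : (pvVals k)[c.toNat - 65]? =
          some (Char.ofNat (65 + (c.toNat - 65 + k) % 26)) := by
        rw [vals_at k (c.toNat - 65) hk (by omega), if_pos (by omega)]
      have hpre : ∀ j, j < c.toNat - 65 → ∀ x, pvKeys[j]? = some x → x ≠ c := by
        intro j hj x hx he
        rw [keys_at j (by omega), if_pos (by omega)] at hx
        have hx' := Option.some_inj.mp hx
        have htn : c.toNat = 65 + j := by rw [← he, ← hx', charValid _ (by omega)]
        omega
      have hfind := find_zip pvKeys (pvVals k) c (c.toNat - 65) _ hkeys hvals hpre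
      unfold bChar
      rw [hfind]
      simp only [Option.map_some, Option.getD_some]
      unfold aChar
      rw [if_pos ha, if_pos hu]
      congr 1
      simp only [hmodAll]
      omega
    · -- lowercase letter, key index 26 + (c.toNat - 97)
      have hu' : ¬ (PySem.Chars.isupper c = true) := fun h => by
        have := (isupper_iff c).mp h
        omega
      have hc : Char.ofNat (97 + (26 + (c.toNat - 97) - 26)) = c := by
        conv_rhs => rw [← Char.ofNat_toNat c]
        exact congrArg Char.ofNat (by omega)
      have hkeys : pvKeys[26 + (c.toNat - 97)]? = some c := by
        rw [keys_at (26 + (c.toNat - 97)) (by omega), if_neg (by omega), hc]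
      have hvals : (pvVals k)[26 + (c.toNat - 97)]? =
          some (Char.ofNat (97 + (26 + (c.toNat - 97) - 26 + k) % 26)) := by
        rw [vals_at k (26 + (c.toNat - 97)) hk (by omega), if_neg (by omega)]
      have hpre : ∀ j, j < 26 + (c.toNat - 97) → ∀ x, pvKeys[j]? = some x → x ≠ c := by
        intro j hj x hx he
        by_cases h26 : j < 26
        · rw [keys_at j (by omega), if_pos h26] at hx
          have hx' := Option.some_inj.mp hx
          have htn : c.toNat = 65 + j := by rw [← he, ← hx', charValid _ (by omega)]
          omega
        · rw [keys_at j (by omega), if_neg h26] at hx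
          have hx' := Option.some_inj.mp hx
          have htn : c.toNat = 97 + (j - 26) := by rw [← he, ← hx', charValid _ (by omega)]
          omega
      have hfind := find_zip pvKeys (pvVals k) c (26 + (c.toNat - 97)) _ hkeys hvals hpre
      unfold bChar
      rw [hfind]
      simp only [Option.map_some, Option.getD_some]
      unfold aChar
      rw [if_pos ha, if_neg hu']
      refine congrArg Char.ofNat ?_
      simp only [hmodAll]
      omega
  · -- non-alphabetic: both sides are the identity
    have hmem : c ∉ pvKeys := fun hmem => ha (alpha_of_mem c hmem)
    rw [bChar_not_mem k hmem]
    unfold aChar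
    rw [if_neg ha]

lemma aChar_eq_bChar (n : Int) (c : Char) :
    aChar n c = bChar (PySem.Int.mod n 26).toNat c := by
  have hmodAll : ∀ a : Int, PySem.Int.mod a 26 = a % 26 := fun a =>
    PySem.Int.mod_eq_emod_of_pos (by norm_num)
  have hk : (PySem.Int.mod n 26).toNat < 26 := by
    have hm := hmodAll n
    have h2 : n % 26 < 26 := Int.emod_lt_of_pos n (by norm_num)
    omega
  have hshift : aChar n c = aChar ((PySem.Int.mod n 26).toNat : Int) c := by
    unfold aChar
    simp only [hmodAll]
    split
    · congr 1
      split <;> omega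
    · rfl
  rw [hshift]
  exact aChar_bChar _ hk c

lemma foldl_shape (n : Int) (l : List Char) (acc : List Char) :
    l.foldl (fun (result : List Char) (char : Char) =>
      if PySem.Chars.isalpha char then
        let base : Int := if PySem.Chars.isupper char then 65 else 97
        result ++ [Char.ofNat ((PySem.Int.mod ((char.toNat : Int) - base + n) 26 + base).toNat)]
      else
        result ++ [char]) acc = acc ++ l.map (aChar n) := by
  induction l generalizing acc with
  | nil => simp
  | cons x xs ih =>
    simp only [List.foldl_cons, List.map_cons, ih]
    by_cases h : PySem.Chars.isalpha x = true <;> simp [aChar, h]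

-- ===== VERDICT (by name: the statement is the Claim_ definition above) =====
theorem rot_n_spec : Claim_equal_rot_n := by
  intro text n _
  unfold Spec_rot_n
  have hA : rot_n text n = String.mk (text.toList.map (aChar n)) := by
    unfold rot_n
    rw [foldl_shape]
    simp
  have hB : rot_n_alt text n
      = String.mk (text.toList.map (bChar (PySem.Int.mod n 26).toNat)) := rfl
  rw [hA, hB]
  exact congrArg String.mk (List.map_congr_left fun c _ => aChar_eq_bChar n c)
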